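-- pv_equiv track=rewrite | github.com/jakearmijo/data-structures-and-algorithms | data-structures-py/PossibleInterviews/ConsecutiveOnes.py | consecutiveOnes
-- ===== SOURCE A (Python) =====
-- def consecutiveOnes(integer: int) -> int:
--
--   if integer == 0:
--     return 0
--
--   string_of_int = str(integer)
--   stack = []
--   result = 0
--
--   for x in string_of_int:
--     int_of_string = int(x)
--     if int_of_string == 1:
--       stack.append(int_of_string)
--       result = max(result,len(stack))
--     else:
--       stack = []
--
--   return result
-- ===== SOURCE B (Python) =====
-- def consecutiveOnes(integer: int) -> int:
--     digits = [int(c) for c in str(integer)]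
--     return _best(digits)
--
--
-- def _best(ds):
--     # recursively consume one maximal run of equal digits at a time
--     if not ds:
--         return 0
--     d = ds[0]
--     n = 1
--     while n < len(ds) and ds[n] == d:
--         n += 1
--     rest = _best(ds[n:])
--     return max(n, rest) if d == 1 else rest
-- ===== Notes on version B (the rewrite author's own statement) =====
-- stated objective: alternative
-- what changed: B converts the decimal string to a digit list once and then recursively consumes one maximal run of equal digits at a time (run-length decomposition with max over 1-runs), instead of A's per-character counter-stack with reset and running max.
import Mathlib
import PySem

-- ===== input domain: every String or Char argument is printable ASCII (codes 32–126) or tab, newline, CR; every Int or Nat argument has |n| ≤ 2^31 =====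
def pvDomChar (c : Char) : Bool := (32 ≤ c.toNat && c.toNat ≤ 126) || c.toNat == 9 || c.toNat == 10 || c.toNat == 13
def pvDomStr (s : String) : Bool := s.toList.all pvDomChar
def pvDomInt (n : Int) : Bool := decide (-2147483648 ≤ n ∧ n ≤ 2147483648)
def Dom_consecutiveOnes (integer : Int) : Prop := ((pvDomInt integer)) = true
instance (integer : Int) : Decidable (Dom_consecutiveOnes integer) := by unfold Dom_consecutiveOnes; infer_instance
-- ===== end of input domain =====

-- B re-implements A as a recursive maximal-run decomposition of the digit list; equal return values
-- are proved for all nonnegative inputs (both Pythons raise ValueError on negatives, via int('-')).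

-- ===== PORT A =====

-- int(x) for a one-character string; exact on decimal digit chars, the only ones reached under Pre_
def pvVal (x : Char) : Int := (PySem.Int.ofChars? [x]).getD 0

-- one iteration of A's 'for x in string_of_int' loop over the state (stack, result)
def pvStepA (st : List Int × Int) (x : Char) : List Int × Int :=
  let int_of_string := pvVal x
  if int_of_string = 1 then
    let stack := st.1 ++ [int_of_string]
    (stack, max st.2 (PySem.List.len stack))
  else
    ([], st.2)

def consecutiveOnes (integer : Int) : Int :=
  if integer = 0 then 0
  else
    let string_of_int := PySem.Int.toChars integer
    (string_of_int.foldl pvStepA ([], (0 : Int))).2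

-- ===== PORT B =====

-- _best: consume one maximal run of equal digits, recurse on the rest
-- (the fuel argument, initially the list length, only makes the recursion structural: it never runs out)
def pvBest : Nat → List Int → Int
  | _, [] => 0
  | 0, _ :: _ => 0
  | fuel + 1, d :: t =>
    let n : Int := 1 + (t.takeWhile (fun x => decide (x = d))).length
    let rest := pvBest fuel (t.dropWhile (fun x => decide (x = d)))
    if d = 1 then max n rest else rest

def consecutiveOnes_alt (integer : Int) : Int :=
  let digits := (PySem.Int.toChars integer).map pvVal
  pvBest digits.length digits

-- ===== PRECONDITION & SPEC =====
-- Pre_ excludes exactly the negative inputs, on which the Python A raises ValueError (int('-')).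
def Pre_consecutiveOnes (integer : Int) : Prop := 0 ≤ integer
instance (integer : Int) : Decidable (Pre_consecutiveOnes integer) := by unfold Pre_consecutiveOnes; infer_instance
def pvWitness_consecutiveOnes : Int := (110111)

def Spec_consecutiveOnes (integer : Int) (out : Int) : Prop := out = consecutiveOnes_alt integer
instance (integer : Int) (out : Int) : Decidable (Spec_consecutiveOnes integer out) := by unfold Spec_consecutiveOnes; infer_instance

-- ===== CLAIM (what is proved, stated in full; the proofs are below) =====
def Claim_equal_consecutiveOnes : Prop := ∀ (integer : Int), Dom_consecutiveOnes integer → Pre_consecutiveOnes integer → Spec_consecutiveOnes integer (consecutiveOnes integer)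

-- ===== LEMMAS AND PROOFS =====

-- abstract form of A's loop: k = current stack length, r = result so far
def pvG : List Int → Nat → Int → Int
  | [], _, r => r
  | d :: t, k, r => if d = 1 then pvG t (k + 1) (max r ((k : Int) + 1)) else pvG t 0 r

theorem pvFoldA_eq_G (cs : List Char) : ∀ (stack : List Int) (r : Int),
    (cs.foldl pvStepA (stack, r)).2 = pvG (cs.map pvVal) stack.length r := by
  induction cs with
  | nil => intro stack r; simp [pvG]
  | cons c cs ih =>
    intro stack r
    by_cases h : pvVal c = 1
    · simp [pvStepA, pvG, h, ih, PySem.List.len]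
    · simp [pvStepA, pvG, h, ih]

theorem pvG_max (ds : List Int) : ∀ (k : Nat) (r : Int), 0 ≤ r →
    pvG ds k r = max r (pvG ds k 0) := by
  induction ds with
  | nil => intro k r hr; simp [pvG]; omega
  | cons d t ih =>
    intro k r hr
    by_cases h : d = 1
    · simp only [pvG, if_pos h]
      rw [ih (k + 1) (max r ((k : Int) + 1)) (by omega),
          ih (k + 1) (max 0 ((k : Int) + 1)) (by omega)]
      omega
    · simp only [pvG, if_neg h]
      exact ih 0 r hr

theorem pvG_skip (pre : List Int) : ∀ (rest : List Int) (r : Int), (∀ x ∈ pre, x ≠ 1) →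
    pvG (pre ++ rest) 0 r = pvG rest 0 r := by
  induction pre with
  | nil => intro rest r _; rfl
  | cons d t ih =>
    intro rest r h
    have hd : d ≠ 1 := h d (by simp)
    simp only [List.cons_append, pvG, if_neg hd]
    exact ih rest r (fun x hx => h x (by simp [hx]))

theorem pvG_ones (pre : List Int) : ∀ (suf : List Int) (k : Nat), (∀ x ∈ pre, x = 1) →
    pvG (pre ++ suf) k (k : Int) = pvG suf (k + pre.length) ((k : Int) + pre.length) := by
  induction pre with
  | nil => intro suf k _; simp
  | cons d t ih =>
    intro suf k h
    have hd : d = 1 := h d (by simp)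
    have hmax : max (k : Int) ((k : Int) + 1) = ((k + 1 : Nat) : Int) := by push_cast; omega
    simp only [List.cons_append, pvG, if_pos hd, hmax]
    rw [ih suf (k + 1) (fun x hx => h x (by simp [hx]))]
    congr 1
    · simp only [List.length_cons]; omega
    · simp only [List.length_cons]; push_cast; omega

theorem pvG_zero_head (suf : List Int) (k : Nat) (h : ∀ e ∈ suf.head?, e ≠ 1) :
    pvG suf k 0 = pvG suf 0 0 := by
  cases suf with
  | nil => rfl
  | cons e t =>
    have he : e ≠ 1 := h e (by simp)
    simp [pvG, if_neg he]

theorem pvG_eq_best (n : Nat) : ∀ (ds : List Int), ds.length ≤ n → pvG ds 0 0 = pvBest n ds := by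
  induction n with
  | zero =>
    intro ds h
    have : ds = [] := List.length_eq_zero_iff.mp (Nat.le_zero.mp h)
    simp [this, pvG, pvBest]
  | succ n ih =>
    intro ds h
    cases ds with
    | nil => simp [pvG, pvBest]
    | cons d t =>
      have hsplit : t.takeWhile (fun x => decide (x = d)) ++ t.dropWhile (fun x => decide (x = d)) = t :=
        t.takeWhile_append_dropWhile
      have hpre : ∀ x ∈ t.takeWhile (fun x => decide (x = d)), x = d := by
        intro x hx
        simpa using List.mem_takeWhile_imp hx
      have hsuflen : (t.dropWhile (fun x => decide (x = d))).length ≤ n := by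
        have h2 := t.length_dropWhile_le (fun x => decide (x = d))
        simp only [List.length_cons] at h
        omega
      have hsufhead : ∀ e ∈ (t.dropWhile (fun x => decide (x = d))).head?, e ≠ d := by
        intro e he
        have := List.head?_dropWhile_not (fun x => decide (x = d)) t
        rw [he] at this
        simpa using this
      by_cases hd : d = 1
      · subst hd
        have hA : pvG (1 :: t) 0 0 = pvG t 1 1 := by simp [pvG]
        have hones := pvG_ones (t.takeWhile (fun x => decide (x = 1)))
          (t.dropWhile (fun x => decide (x = 1))) 1 hpre
        norm_num at hones
        rw [hA, hones]
        rw [pvG_max _ _ _ (by omega)]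
        rw [pvG_zero_head _ _ (by simpa using hsufhead)]
        rw [ih _ hsuflen]
        simp [pvBest]
      · have hA : pvG (d :: t) 0 0 = pvG t 0 0 := by simp [pvG, hd]
        rw [hA]
        conv_lhs => rw [← hsplit]
        rw [pvG_skip _ _ _ (fun x hx => by rw [hpre x hx]; exact hd)]
        rw [ih _ hsuflen]
        simp only [pvBest, if_neg hd]

theorem pvBest_zero : consecutiveOnes_alt 0 = 0 := by decide

-- ===== VERDICT (by name: the statement is the Claim_ definition above) =====
theorem consecutiveOnes_spec : Claim_equal_consecutiveOnes := by
  intro integer _ _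
  unfold Spec_consecutiveOnes consecutiveOnes
  by_cases h0 : integer = 0
  · simp [h0, pvBest_zero]
  · rw [if_neg h0]
    show ((PySem.Int.toChars integer).foldl pvStepA ([], 0)).2 = _
    rw [pvFoldA_eq_G]
    exact pvG_eq_best _ _ le_rfl
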